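-- pv_equiv track=rewrite | github.com/FadelMamar/3dcp.fyi | src/3dcp/mkdocs/convert.py | _convert_tables_to_html
-- ===== SOURCE A (Python) =====
-- from typing import List, Dict, Tuple, Optional
--
-- def _render_table_html(table_lines: List[str]) -> str:
--     """
--     Convert a markdown table (as list of lines) into HTML table markup.
--     """
--     if len(table_lines) < 2:
--         return '\n'.join(table_lines)
--
--     # First line headers, second line alignment markers (skip)
--     header_cells = [cell.strip() for cell in table_lines[0].strip('|').split('|')]
--     body_lines = table_lines[2:] if len(table_lines) > 2 else []
--
--     html_lines = [
--         '<table class="overview-table">',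
--         '  <thead>',
--         '    <tr>' + ''.join(f'<th>{cell or "&nbsp;"}</th>' for cell in header_cells) + '</tr>',
--         '  </thead>',
--         '  <tbody>'
--     ]
--
--     for line in body_lines:
--         cells = [cell.strip() for cell in line.strip('|').split('|')]
--         html_lines.append('    <tr>' + ''.join(f'<td>{cell or "&nbsp;"}</td>' for cell in cells) + '</tr>')
--
--     html_lines.append('  </tbody>')
--     html_lines.append('</table>')
--     return '\n'.join(html_lines)
--
-- def _convert_tables_to_html(block: str) -> str:
--     """
--     Locate markdown tables inside the block and convert them to HTML tables.
--     """
--     lines = block.splitlines()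
--     html_segments: List[str] = []
--     table_buffer: List[str] = []
--
--     def flush_table():
--         if table_buffer:
--             html_segments.append(_render_table_html(table_buffer))
--             table_buffer.clear()
--
--     for line in lines:
--         stripped = line.strip()
--         if stripped.startswith('|'):
--             table_buffer.append(stripped)
--         else:
--             flush_table()
--             html_segments.append(line)
--
--     flush_table()
--     return '\n'.join(html_segments)
-- ===== SOURCE B (Python) =====
-- from typing import List
--
-- def _render_table_html(table_lines: List[str]) -> str:
--     """
--     Convert a markdown table (as list of lines) into HTML table markup.
--     """
--     if len(table_lines) < 2:
--         return '\n'.join(table_lines)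
--
--     header_cells = [cell.strip() for cell in table_lines[0].strip('|').split('|')]
--     body_lines = table_lines[2:] if len(table_lines) > 2 else []
--
--     html_lines = [
--         '<table class="overview-table">',
--         '  <thead>',
--         '    <tr>' + ''.join(f'<th>{cell or "&nbsp;"}</th>' for cell in header_cells) + '</tr>',
--         '  </thead>',
--         '  <tbody>'
--     ]
--
--     for line in body_lines:
--         cells = [cell.strip() for cell in line.strip('|').split('|')]
--         html_lines.append('    <tr>' + ''.join(f'<td>{cell or "&nbsp;"}</td>' for cell in cells) + '</tr>')
--
--     html_lines.append('  </tbody>')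
--     html_lines.append('</table>')
--     return '\n'.join(html_lines)
--
-- def _convert_tables_to_html(block: str) -> str:
--     """
--     Staged passes over indices: (1) mark table lines, (2) compute the segment
--     boundary indices by slicing-friendly arithmetic (a segment starts at every
--     non-table line and at every first line of a table run), (3) build each
--     segment from its index range by slicing the line list.  No running
--     accumulator or flush state is needed.
--     """
--     lines = block.splitlines()
--     n = len(lines)
--     is_tab = [line.strip().startswith('|') for line in lines]
--     starts = [i for i in range(n) if not is_tab[i] or i == 0 or not is_tab[i - 1]]
--     ends = starts[1:] + [n]
--     segments = [
--         _render_table_html([l.strip() for l in lines[s:e]]) if is_tab[s] else lines[s]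
--         for s, e in zip(starts, ends)
--     ]
--     return '\n'.join(segments)
-- ===== Notes on version B (the rewrite author's own statement) =====
-- stated objective: alternative
-- what changed: Replaced the streaming accumulator (table_buffer + flush closure inside one stateful pass) with staged passes over indices: first mark table lines, then compute the list of segment-boundary indices, then build each segment by slicing the line list between consecutive boundaries; no running buffer or flush state exists.
import Mathlib
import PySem

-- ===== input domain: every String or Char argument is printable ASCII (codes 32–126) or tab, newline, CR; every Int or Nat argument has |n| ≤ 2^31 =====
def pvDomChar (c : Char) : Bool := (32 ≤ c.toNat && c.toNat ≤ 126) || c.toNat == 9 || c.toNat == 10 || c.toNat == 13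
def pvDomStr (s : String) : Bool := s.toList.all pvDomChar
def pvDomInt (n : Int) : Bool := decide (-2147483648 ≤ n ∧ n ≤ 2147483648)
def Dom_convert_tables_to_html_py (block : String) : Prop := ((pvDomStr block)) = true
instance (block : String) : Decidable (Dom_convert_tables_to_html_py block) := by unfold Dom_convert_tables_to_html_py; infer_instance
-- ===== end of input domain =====

-- B replaces A's streaming table_buffer+flush accumulator with staged index passes:
-- mark table lines, compute the segment-boundary index list, then build each segment
-- by slicing between consecutive boundaries (alternative decomposition, same cost).


-- ===== PORT A =====
-- _render_table_html, textually identical in Source A and Source B: defined once, used by both ports.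
-- Cell lists are handled on the List Char side (PySem.Chars: exact on the ASCII domain); the
-- f-string '<th>…</th>' pieces are the concatenations shown, ''.join is List.flatten.
def renderCells (cs : List Char) (tag : String) : String :=
  let cells := (PySem.Chars.splitOn (PySem.Chars.stripChars cs ['|']) ['|']).map PySem.Chars.strip
  String.ofList ((cells.map (fun cell =>
    ("<" ++ tag ++ ">").toList ++ (if cell = [] then "&nbsp;".toList else cell) ++ ("</" ++ tag ++ ">").toList)).flatten)

def renderTableHtml (table_lines : List String) : String :=
  if table_lines.length < 2 then PySem.Str.join "\n" table_lines
  else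
    let body_lines := if table_lines.length > 2 then table_lines.drop 2 else []
    let html_lines := [
      "<table class=\"overview-table\">",
      "  <thead>",
      "    <tr>" ++ renderCells (table_lines.headD "").toList "th" ++ "</tr>",
      "  </thead>",
      "  <tbody>" ]
    let html_lines := html_lines ++ body_lines.map (fun line =>
      "    <tr>" ++ renderCells line.toList "td" ++ "</tr>")
    let html_lines := html_lines ++ ["  </tbody>", "</table>"]
    PySem.Str.join "\n" html_lines

-- flush_table: append the rendered buffer (if nonempty) and clear it
def flushA (segs buf : List String) : List String :=
  if buf ≠ [] then segs ++ [renderTableHtml buf] else segs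

-- the body of A's 'for line in lines' loop, state = (html_segments, table_buffer)
def stepA (st : List String × List String) (line : String) : List String × List String :=
  let stripped := PySem.Str.strip line
  if PySem.Str.startswith stripped "|" then (st.1, st.2 ++ [stripped])
  else (flushA st.1 st.2 ++ [line], [])

def convert_tables_to_html_py (block : String) : String :=
  let st := (PySem.Str.splitlines block).foldl stepA ([], [])
  PySem.Str.join "\n" (flushA st.1 st.2)

-- ===== PORT B =====
-- staged passes of Source B: is_tab marks, starts = boundary indices, ends = starts[1:]+[n],
-- one segment per (s,e) pair by slicing.  is_tab[i] / lines[s] always hit valid indices in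
-- Source B, so getD/pyGetD are exact; lines[s:e] is PySem.List.slice.
def convert_tables_to_html_py_alt (block : String) : String :=
  let lines := PySem.Str.splitlines block
  let n := lines.length
  let is_tab := lines.map (fun line => PySem.Str.startswith (PySem.Str.strip line) "|")
  let starts := (List.range n).filter (fun i => !(is_tab.getD i false) || i == 0 || !(is_tab.getD (i - 1) false))
  let ends := starts.tail ++ [n]
  let segments := (starts.zip ends).map (fun se =>
    if is_tab.getD se.1 false then
      renderTableHtml ((PySem.List.slice lines (some (se.1 : Int)) (some (se.2 : Int))).map PySem.Str.strip)
    else PySem.List.pyGetD lines (se.1 : Int) "")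
  PySem.Str.join "\n" segments

-- ===== PRECONDITION & SPEC =====
def Spec_convert_tables_to_html_py (block : String) (out : String) : Prop := out = convert_tables_to_html_py_alt block
instance (block : String) (out : String) : Decidable (Spec_convert_tables_to_html_py block out) := by unfold Spec_convert_tables_to_html_py; infer_instance

-- ===== CLAIM (what is proved, stated in full; the proofs are below) =====
def Claim_equal_convert_tables_to_html_py : Prop := ∀ (block : String), Dom_convert_tables_to_html_py block → Spec_convert_tables_to_html_py block (convert_tables_to_html_py block)

-- ===== LEMMAS AND PROOFS =====

-- key of a line: does its stripped form start with '|'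
def lineKey (l : String) : Bool := PySem.Str.startswith (PySem.Str.strip l) "|"

-- proof-side middle form: maximal-run recursion both ports are reduced to
def altTakeRun : List String → List String × List String
  | [] => ([], [])
  | l :: ls =>
    if lineKey l then
      let p := altTakeRun ls
      (PySem.Str.strip l :: p.1, p.2)
    else ([], l :: ls)

theorem altTakeRun_rest_le (ls : List String) : (altTakeRun ls).2.length ≤ ls.length := by
  induction ls with
  | nil => simp [altTakeRun]
  | cons l ls ih =>
    simp only [altTakeRun]
    split
    · simpa using Nat.le_succ_of_le ih
    · simp

def altGo : List String → List String
  | [] => []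
  | l :: ls =>
    if lineKey l then
      let p := altTakeRun ls
      renderTableHtml (PySem.Str.strip l :: p.1) :: altGo p.2
    else l :: altGo ls
termination_by ls => ls.length
decreasing_by
  · exact Nat.lt_succ_of_le (altTakeRun_rest_le ls)
  · simp

-- ===== A-side: the fold with buffer equals altGo =====

theorem stepA_table {l : String} (segs buf : List String) (h : lineKey l = true) :
    stepA (segs, buf) l = (segs, buf ++ [PySem.Str.strip l]) := by
  have h' : PySem.Chars.startswith (PySem.Chars.strip l.toList) ['|'] = true := by
    simpa [lineKey] using h
  simp [stepA, h']

theorem stepA_other {l : String} (segs buf : List String) (h : lineKey l = false) :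
    stepA (segs, buf) l = (flushA segs buf ++ [l], []) := by
  have h' : PySem.Chars.startswith (PySem.Chars.strip l.toList) ['|'] = false := by
    simpa [lineKey] using h
  simp [stepA, h']

theorem altTakeRun_table {l : String} (ls : List String) (h : lineKey l = true) :
    altTakeRun (l :: ls) = (PySem.Str.strip l :: (altTakeRun ls).1, (altTakeRun ls).2) := by
  simp [altTakeRun, h]

theorem altTakeRun_other {l : String} (ls : List String) (h : lineKey l = false) :
    altTakeRun (l :: ls) = ([], l :: ls) := by
  simp [altTakeRun, h]

theorem altGo_nil : altGo [] = [] := by simp [altGo]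

theorem altGo_table {l : String} (ls : List String) (h : lineKey l = true) :
    altGo (l :: ls) = renderTableHtml (PySem.Str.strip l :: (altTakeRun ls).1) :: altGo (altTakeRun ls).2 := by
  rw [altGo]; simp [h]

theorem altGo_other {l : String} (ls : List String) (h : lineKey l = false) :
    altGo (l :: ls) = l :: altGo ls := by
  rw [altGo]; simp [h]

-- what B produces for the remaining lines when A still holds the pending buffer buf
def tailWith (buf : List String) (ls : List String) : List String :=
  match buf with
  | [] => altGo ls
  | _ :: _ => renderTableHtml (buf ++ (altTakeRun ls).1) :: altGo (altTakeRun ls).2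

theorem invariant (ls : List String) : ∀ segs buf,
    flushA (ls.foldl stepA (segs, buf)).1 (ls.foldl stepA (segs, buf)).2
      = segs ++ tailWith buf ls := by
  induction ls with
  | nil =>
    intro segs buf
    cases buf with
    | nil => simp [flushA, tailWith, altGo_nil]
    | cons b bs => simp [flushA, tailWith, altTakeRun, altGo_nil]
  | cons l ls ih =>
    intro segs buf
    rw [List.foldl_cons]
    rcases hb : lineKey l with _ | _
    · rw [stepA_other segs buf hb, ih]
      cases buf with
      | nil => simp [tailWith, flushA, altGo_other ls hb]
      | cons b bs =>
        simp [tailWith, flushA, altTakeRun_other ls hb, altGo_other ls hb]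
    · rw [stepA_table segs buf hb, ih]
      cases buf with
      | nil => simp [tailWith, altGo_table ls hb]
      | cons b bs =>
        simp [tailWith, altTakeRun_table ls hb]

-- ===== B-side: the staged index passes equal altGo =====

-- boundary predicate of the port (bs = is_tab)
def cond0 (bs : List Bool) (i : Nat) : Bool :=
  !(bs.getD i false) || i == 0 || !(bs.getD (i - 1) false)

-- boundary predicate generalised by the value preceding the list
def condP (prev : Bool) (bs : List Bool) (i : Nat) : Bool :=
  !(bs.getD i false) || (i == 0 && !prev) || (decide (i ≠ 0) && !(bs.getD (i - 1) false))

-- recursive form of the boundary-index list, prev = key of the previous line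
def gstarts : Bool → List Bool → List Nat
  | _, [] => []
  | prev, b :: bs => (if !b || !prev then [0] else []) ++ (gstarts b bs).map (· + 1)

theorem condP_false_eq (bs : List Bool) (i : Nat) : condP false bs i = cond0 bs i := by
  cases i <;> simp [cond0, condP]

theorem condP_shift (prev b : Bool) (bs : List Bool) (i : Nat) :
    condP prev (b :: bs) (i + 1) = condP b bs i := by
  cases i <;> simp [condP]

theorem gstarts_eq (bs : List Bool) : ∀ prev,
    (List.range bs.length).filter (condP prev bs) = gstarts prev bs := by
  induction bs with
  | nil => intro prev; simp [gstarts]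
  | cons b bs ih =>
    intro prev
    rw [List.length_cons, List.range_succ_eq_map, List.filter_cons]
    have h1 : ((List.range bs.length).map (· + 1)).filter (condP prev (b :: bs))
        = (gstarts b bs).map (· + 1) := by
      rw [List.filter_map, ← ih b]
      congr 1
      apply List.filter_congr
      intro i _
      exact condP_shift prev b bs i
    have h0 : condP prev (b :: bs) 0 = (!b || !prev) := by simp [condP]
    rw [h1, h0]
    rcases hc : (!b || !prev) with _ | _ <;> simp [gstarts, hc]

theorem gstarts_false_cons (b : Bool) (bs : List Bool) :
    gstarts false (b :: bs) = 0 :: (gstarts b bs).map (· + 1) := by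
  simp [gstarts]

-- the segment built from one index pair (the port's lambda)
def segFun (lines : List String) (se : Nat × Nat) : String :=
  if (lines.map lineKey).getD se.1 false then
    renderTableHtml ((PySem.List.slice lines (some (se.1 : Int)) (some (se.2 : Int))).map PySem.Str.strip)
  else PySem.List.pyGetD lines (se.1 : Int) ""

def segsOf (lines : List String) : List String :=
  let S := gstarts false (lines.map lineKey)
  (S.zip (S.tail ++ [lines.length])).map (segFun lines)

theorem alt_eq_segsOf (block : String) :
    convert_tables_to_html_py_alt block
      = PySem.Str.join "\n" (segsOf (PySem.Str.splitlines block)) := by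
  have h : ∀ lines : List String,
      (List.range lines.length).filter (fun i =>
        !( (lines.map (fun line => PySem.Str.startswith (PySem.Str.strip line) "|")).getD i false)
          || i == 0
          || !( (lines.map (fun line => PySem.Str.startswith (PySem.Str.strip line) "|")).getD (i - 1) false))
        = gstarts false (lines.map (fun line => PySem.Str.startswith (PySem.Str.strip line) "|")) := by
    intro lines
    rw [← gstarts_eq]
    rw [List.length_map]  -- range over bs.length vs lines.length
    apply List.filter_congr
    intro i _
    exact (condP_false_eq _ i).symm
  simp only [convert_tables_to_html_py_alt, segsOf]
  rw [h]
  rfl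

-- run-length facts
theorem run_le (ls : List String) : (altTakeRun ls).1.length ≤ ls.length := by
  induction ls with
  | nil => simp [altTakeRun]
  | cons l ls ih =>
    by_cases h : lineKey l = true
    · rw [altTakeRun_table ls h]; simpa using ih
    · rw [altTakeRun_other ls (by simpa using h)]; simp

theorem run_drop (ls : List String) : ls.drop (altTakeRun ls).1.length = (altTakeRun ls).2 := by
  induction ls with
  | nil => simp [altTakeRun]
  | cons l ls ih =>
    by_cases h : lineKey l = true
    · rw [altTakeRun_table ls h]; simpa using ih
    · rw [altTakeRun_other ls (by simpa using h)]; simp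

theorem run_take (ls : List String) :
    (ls.take (altTakeRun ls).1.length).map PySem.Str.strip = (altTakeRun ls).1 := by
  induction ls with
  | nil => simp [altTakeRun]
  | cons l ls ih =>
    by_cases h : lineKey l = true
    · rw [altTakeRun_table ls h]; simpa using ih
    · rw [altTakeRun_other ls (by simpa using h)]; simp

theorem run_len (ls : List String) :
    (altTakeRun ls).1.length + (altTakeRun ls).2.length = ls.length := by
  have h := congrArg List.length (run_drop ls)
  rw [List.length_drop] at h
  have := run_le ls
  omega

theorem gstarts_true_run (ls : List String) :
    gstarts true (ls.map lineKey)
      = (gstarts false ((altTakeRun ls).2.map lineKey)).map (· + (altTakeRun ls).1.length) := by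
  induction ls with
  | nil => simp [altTakeRun, gstarts]
  | cons l ls ih =>
    by_cases h : lineKey l = true
    · rw [altTakeRun_table ls h]
      have hg : gstarts true ((l :: ls).map lineKey) = (gstarts true (ls.map lineKey)).map (· + 1) := by
        simp [gstarts, h]
      rw [hg, ih, List.map_map]
      simp only [List.length_cons]
      rfl
    · have h' : lineKey l = false := by simpa using h
      rw [altTakeRun_other ls h']
      simp [List.map_cons, h', gstarts]

-- shifting an index pair by k is working on the dropped list
theorem segFun_shift (k : Nat) (lines : List String) (se : Nat × Nat) :
    segFun lines (se.1 + k, se.2 + k) = segFun (lines.drop k) se := by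
  obtain ⟨s, e⟩ := se
  simp only [segFun]
  have hkey : ((lines.drop k).map lineKey).getD s false = (lines.map lineKey).getD (s + k) false := by
    rw [List.map_drop]
    simp [List.getD_eq_getElem?_getD, List.getElem?_drop, Nat.add_comm]
  have hslice : PySem.List.slice lines (some ((s + k : Nat) : Int)) (some ((e + k : Nat) : Int))
      = PySem.List.slice (lines.drop k) (some ((s : Nat) : Int)) (some ((e : Nat) : Int)) := by
    rw [PySem.List.slice_natCast, PySem.List.slice_natCast, List.drop_drop]
    have h1 : e + k - (s + k) = e - s := by omega
    have h2 : s + k = k + s := by omega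
    rw [h1, h2]
  have hget : PySem.List.pyGetD lines ((s + k : Nat) : Int) "" = PySem.List.pyGetD (lines.drop k) ((s : Nat) : Int) "" := by
    rw [PySem.List.pyGetD_natCast, PySem.List.pyGetD_natCast]
    simp [List.getD_eq_getElem?_getD, List.getElem?_drop, Nat.add_comm]
  rw [← hkey, hslice, hget]

theorem zip_tail_shift (S₂ : List Nat) (k m : Nat) :
    (S₂.map (· + k)).zip ((S₂.map (· + k)).tail ++ [m + k])
      = (S₂.zip (S₂.tail ++ [m])).map (fun se => (se.1 + k, se.2 + k)) := by
  have h1 : (S₂.map (· + k)).tail ++ [m + k] = (S₂.tail ++ [m]).map (· + k) := by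
    rw [List.map_append, ← List.map_tail]
    simp
  rw [h1, List.zip_map]
  rfl

theorem segsOf_cons (lines rest : List String) (k : Nat)
    (hS : gstarts false (lines.map lineKey)
            = 0 :: (gstarts false (rest.map lineKey)).map (· + k))
    (hn : lines.length = rest.length + k)
    (hd : lines.drop k = rest) :
    segsOf lines = segFun lines (0, k) :: segsOf rest := by
  have hfun : (segFun lines) ∘ (fun se : Nat × Nat => (se.1 + k, se.2 + k)) = segFun (lines.drop k) :=
    funext (segFun_shift k lines)
  cases rest with
  | nil =>
    have hk : lines.length = k := by simpa using hn
    simp [segsOf, hS, gstarts, hk]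
  | cons r rs =>
    have hn' : lines.length = rs.length + 1 + k := by simpa using hn
    have hzip := zip_tail_shift ((0 : Nat) :: (gstarts (lineKey r) (rs.map lineKey)).map (· + 1)) k (rs.length + 1)
    simp only [List.map_cons, List.tail_cons, Nat.zero_add] at hzip
    simp only [segsOf]
    rw [hS, List.map_cons, gstarts_false_cons, hn']
    simp only [List.map_cons, Nat.zero_add, List.tail_cons, List.cons_append]
    rw [List.zip_cons_cons, List.map_cons, hzip, List.map_map, hfun, hd]
    simp

theorem segFun_head_table (l : String) (ls : List String) (hk : lineKey l = true) :
    segFun (l :: ls) (0, (altTakeRun ls).1.length + 1)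
      = renderTableHtml (PySem.Str.strip l :: (altTakeRun ls).1) := by
  simp only [segFun]
  have h0 : (((l :: ls).map lineKey).getD 0 false) = true := by simp [hk]
  rw [h0, if_pos rfl]
  have hslice : PySem.List.slice (l :: ls) (some ((0 : Nat) : Int)) (some (((altTakeRun ls).1.length + 1 : Nat) : Int))
      = l :: ls.take (altTakeRun ls).1.length := by
    rw [PySem.List.slice_natCast]
    simp [List.take_succ_cons]
  rw [hslice]
  simp [run_take ls]

theorem segFun_head_other (l : String) (ls : List String) (hk : lineKey l = false) (k : Nat) :
    segFun (l :: ls) (0, k) = l := by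
  simp only [segFun]
  have h0 : (((l :: ls).map lineKey).getD 0 false) = false := by simp [hk]
  rw [h0]
  simp [PySem.List.pyGetD]

theorem segsOf_eq_altGo_bounded : ∀ (N : Nat) (ls : List String), ls.length ≤ N → segsOf ls = altGo ls := by
  intro N
  induction N with
  | zero =>
    intro ls h
    have : ls = [] := List.length_eq_zero_iff.mp (Nat.le_zero.mp h)
    subst this
    simp [segsOf, gstarts, altGo_nil]
  | succ N ih =>
    intro ls h
    cases ls with
    | nil => simp [segsOf, gstarts, altGo_nil]
    | cons l ls' =>
      by_cases hk : lineKey l = true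
      · have hlen := run_len ls'
        have hS : gstarts false ((l :: ls').map lineKey)
            = 0 :: (gstarts false ((altTakeRun ls').2.map lineKey)).map (· + ((altTakeRun ls').1.length + 1)) := by
          rw [List.map_cons, gstarts_false_cons, hk, gstarts_true_run ls', List.map_map]
          rfl
        have hd : (l :: ls').drop ((altTakeRun ls').1.length + 1) = (altTakeRun ls').2 := by
          rw [List.drop_succ_cons, run_drop]
        have hn : (l :: ls').length = (altTakeRun ls').2.length + ((altTakeRun ls').1.length + 1) := by
          simp only [List.length_cons]
          omega
        rw [segsOf_cons _ _ _ hS hn hd]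
        rw [ih (altTakeRun ls').2 (by simp only [List.length_cons] at h; omega)]
        rw [altGo_table ls' hk, segFun_head_table l ls' hk]
      · have hk' : lineKey l = false := by simpa using hk
        have hS : gstarts false ((l :: ls').map lineKey)
            = 0 :: (gstarts false (ls'.map lineKey)).map (· + 1) := by
          rw [List.map_cons, gstarts_false_cons, hk']
        rw [segsOf_cons _ ls' 1 hS (by simp) (by simp)]
        rw [ih ls' (by simp only [List.length_cons] at h; omega)]
        rw [altGo_other ls' hk', segFun_head_other l ls' hk']

theorem segsOf_eq_altGo (lines : List String) : segsOf lines = altGo lines :=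
  segsOf_eq_altGo_bounded lines.length lines le_rfl

-- ===== VERDICT (by name: the statement is the Claim_ definition above) =====
theorem convert_tables_to_html_py_spec : Claim_equal_convert_tables_to_html_py := by
  intro block _
  show convert_tables_to_html_py block = convert_tables_to_html_py_alt block
  rw [alt_eq_segsOf, segsOf_eq_altGo]
  simp only [convert_tables_to_html_py,
    invariant (PySem.Str.splitlines block) [] [], tailWith, List.nil_append]
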